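-- pv_equiv track=rewrite | github.com/kressi/adventofcode-2024 | 21/day_21_a.py | presses_pad
-- ===== SOURCE A (Python) =====
-- def presses_pad(code, pad, permutate=False):
--     sequences0 = [tuple()]
--     p0 = pad["A"]
--     zero = pad["_"]
--     for c in code:
--         p1 = pad[c]
--         sequences1 = []
--         for s in sequences0:
--             for p in pad_presses_ab(p0, p1, zero, permutate):
--                 sequences1.append(s + p)
--         sequences0 = sequences1
--         p0 = p1
--     return sequences0
--
-- def pad_presses_ab(a, b, zero, permutate=False):
--     di = b[0] - a[0]
--     dj = b[1] - a[1]
--     if di > 0: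
--         i = tuple(["v"]) * di
--     elif di < 0:
--         i = tuple(["^"]) * (-di)
--     else:
--         i = tuple()
--     if dj > 0:
--         j = tuple([">"]) * dj
--     elif dj < 0:
--         j = tuple(["<"]) * (-dj)
--     else:
--         j = tuple()
--     if a[0] == zero[0] and b[1] == zero[1]:
--         return [i + j + tuple(["A"])]
--     if a[1] == zero[1] and b[0] == zero[0]:
--         return [j + i + tuple(["A"])]
--     if permutate and i and j:
--         return [i + j + tuple(["A"]), j + i + tuple(["A"])]
--     return [i + j + tuple(["A"])]
-- ===== SOURCE B (Python) =====
-- # B: two-phase decomposition — precompute per-transition option chunks, then combine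
-- # them with a recursive Cartesian product (rightmost varies fastest), instead of A's
-- # fused incremental expansion of the sequence list inside the scan over the code.
-- def presses_pad(code, pad, permutate=False):
--     zero = pad["_"]
--     keys = [pad["A"]] + [pad[c] for c in code]
--     options = [pad_options(a, b, zero, permutate) for a, b in zip(keys, keys[1:])]
--     return _product_concat(options)
--
-- def _product_concat(options):
--     if not options:
--         return [()]
--     rests = _product_concat(options[1:])
--     return [head + rest for head in options[0] for rest in rests]
--
-- def _run(d, pos, neg):
--     return (pos,) * d if d > 0 else (neg,) * (-d)
--
-- def pad_options(a, b, zero, permutate=False):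
--     i = _run(b[0] - a[0], "v", "^")
--     j = _run(b[1] - a[1], ">", "<")
--     if a[0] == zero[0] and b[1] == zero[1]:
--         return [i + j + ("A",)]
--     if a[1] == zero[1] and b[0] == zero[0]:
--         return [j + i + ("A",)]
--     opts = [i + j + ("A",)]
--     if permutate and i and j:
--         opts.append(j + i + ("A",))
--     return opts
-- ===== Notes on version B (the rewrite author's own statement) =====
-- stated objective: alternative
-- what changed: A fuses option generation and combination in one scan that rebuilds the whole sequence list at every key transition; B first precomputes the list of per-transition option chunks and then combines them with a recursive Cartesian product (rightmost varying fastest), preserving order and tuple concatenation.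
import Mathlib
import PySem

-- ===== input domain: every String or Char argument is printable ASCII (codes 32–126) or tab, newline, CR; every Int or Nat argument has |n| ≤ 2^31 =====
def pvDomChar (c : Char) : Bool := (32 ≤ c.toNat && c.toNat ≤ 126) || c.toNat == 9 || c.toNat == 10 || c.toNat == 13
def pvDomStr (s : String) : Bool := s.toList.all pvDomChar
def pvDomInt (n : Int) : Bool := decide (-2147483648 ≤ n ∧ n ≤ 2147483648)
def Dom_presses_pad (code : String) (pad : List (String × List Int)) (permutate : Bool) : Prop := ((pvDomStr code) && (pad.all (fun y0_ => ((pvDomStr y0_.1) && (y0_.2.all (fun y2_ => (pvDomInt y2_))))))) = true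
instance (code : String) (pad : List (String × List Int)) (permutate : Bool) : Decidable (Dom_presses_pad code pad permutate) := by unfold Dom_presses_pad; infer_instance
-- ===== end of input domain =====

-- B replaces A's fused incremental expansion by a two-phase decomposition: precomputed
-- per-transition option chunks combined with a recursive Cartesian product (objective: alternative).


-- ===== PORT A =====
-- pad_presses_ab(a, b, zero, permutate): literal port; the final fallback is Python's IndexError (excluded by Pre_)
def pad_presses_ab (a b zero : List Int) (permutate : Bool) : List (List String) :=
  match PySem.List.pyGet? b 0, PySem.List.pyGet? a 0, PySem.List.pyGet? b 1,
        PySem.List.pyGet? a 1, PySem.List.pyGet? zero 0, PySem.List.pyGet? zero 1 with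
  | some b0, some a0, some b1, some a1, some z0, some z1 =>
    let di := b0 - a0
    let dj := b1 - a1
    let i := if 0 < di then PySem.List.pyRepeat ["v"] di
             else if di < 0 then PySem.List.pyRepeat ["^"] (-di) else []
    let j := if 0 < dj then PySem.List.pyRepeat [">"] dj
             else if dj < 0 then PySem.List.pyRepeat ["<"] (-dj) else []
    if a0 = z0 ∧ b1 = z1 then [i ++ j ++ ["A"]]
    else if a1 = z1 ∧ b0 = z0 then [j ++ i ++ ["A"]]
    else if permutate = true ∧ i ≠ [] ∧ j ≠ [] then [i ++ j ++ ["A"], j ++ i ++ ["A"]]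
    else [i ++ j ++ ["A"]]
  | _, _, _, _, _, _ => []  -- IndexError in Python; excluded by Pre_

-- presses_pad(code, pad, permutate): the dict is an association list, lookup = first match.
-- The 'none' fallbacks are Python's KeyError (excluded by Pre_).
def presses_pad (code : String) (pad : List (String × List Int)) (permutate : Bool) : List (List String) :=
  match List.lookup "A" pad, List.lookup "_" pad with
  | some pA, some zero =>
    (code.toList.foldl (fun st c =>
        match List.lookup (String.singleton c) pad with
        | some p1 =>
          (st.1.foldl (fun s1 s =>
              (pad_presses_ab st.2 p1 zero permutate).foldl (fun s1' p => s1' ++ [s ++ p]) s1) [],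
           p1)
        | none => st)  -- KeyError; excluded by Pre_
      (([([] : List String)] : List (List String)), pA)).1
  | _, _ => []  -- KeyError; excluded by Pre_

-- ===== PORT B =====
def pv_run (d : Int) (pos neg : String) : List String :=
  if 0 < d then PySem.List.pyRepeat [pos] d else PySem.List.pyRepeat [neg] (-d)

def pad_options (a b zero : List Int) (permutate : Bool) : List (List String) :=
  match PySem.List.pyGet? b 0, PySem.List.pyGet? a 0, PySem.List.pyGet? b 1,
        PySem.List.pyGet? a 1, PySem.List.pyGet? zero 0, PySem.List.pyGet? zero 1 with
  | some b0, some a0, some b1, some a1, some z0, some z1 =>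
    let i := pv_run (b0 - a0) "v" "^"
    let j := pv_run (b1 - a1) ">" "<"
    if a0 = z0 ∧ b1 = z1 then [i ++ j ++ ["A"]]
    else if a1 = z1 ∧ b0 = z0 then [j ++ i ++ ["A"]]
    else
      let opts := [i ++ j ++ ["A"]]
      if permutate = true ∧ i ≠ [] ∧ j ≠ [] then opts ++ [j ++ i ++ ["A"]] else opts
  | _, _, _, _, _, _ => []  -- IndexError in Python; excluded by Pre_

-- _product_concat(options): recursive Cartesian product, rightmost varies fastest
def prod_concat : List (List (List String)) → List (List String)
  | [] => [[]]
  | o :: os => o.flatMap (fun h => (prod_concat os).map (fun r => h ++ r))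

def presses_pad_alt (code : String) (pad : List (String × List Int)) (permutate : Bool) : List (List String) :=
  match List.lookup "_" pad, List.lookup "A" pad with
  | some zero, some pA =>
    let keys := pA :: code.toList.map (fun c => (List.lookup (String.singleton c) pad).getD [])
    let options := (keys.zip keys.tail).map (fun ab => pad_options ab.1 ab.2 zero permutate)
    prod_concat options
  | _, _ => []  -- KeyError; excluded by Pre_

-- ===== PRECONDITION & SPEC =====
-- key k is present in the pad and its position has at least two coordinates
def padOk (pad : List (String × List Int)) (k : String) : Prop :=
  2 ≤ ((List.lookup k pad).getD []).length

-- Pre_: exactly the inputs where A returns (no KeyError/IndexError): keys "A" and "_" present,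
-- and — when the code is nonempty, so positions actually get indexed — every looked-up position
-- (pad["A"], pad["_"], pad[c] for each c of code) has length ≥ 2.
def Pre_presses_pad (code : String) (pad : List (String × List Int)) (permutate : Bool) : Prop :=
  (List.lookup "A" pad).isSome = true ∧ (List.lookup "_" pad).isSome = true ∧
  (code.toList ≠ [] →
    padOk pad "A" ∧ padOk pad "_" ∧
    code.toList.all (fun c =>
      decide (2 ≤ ((List.lookup (String.singleton c) pad).getD []).length)) = true)

instance (code : String) (pad : List (String × List Int)) (permutate : Bool) : Decidable (Pre_presses_pad code pad permutate) := by
  unfold Pre_presses_pad padOk; infer_instance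

def pvWitness_presses_pad : String × (List (String × List Int)) × Bool :=
  ("02", [("A", [3, 2]), ("_", [3, 0]), ("0", [3, 1]), ("2", [2, 1])], false)

def Spec_presses_pad (code : String) (pad : List (String × List Int)) (permutate : Bool) (out : List (List String)) : Prop := out = presses_pad_alt code pad permutate
instance (code : String) (pad : List (String × List Int)) (permutate : Bool) (out : List (List String)) : Decidable (Spec_presses_pad code pad permutate out) := by unfold Spec_presses_pad; infer_instance

-- ===== CLAIM (what is proved, stated in full; the proofs are below) =====
def Claim_equal_presses_pad : Prop := ∀ (code : String) (pad : List (String × List Int)) (permutate : Bool), Dom_presses_pad code pad permutate → Pre_presses_pad code pad permutate → Spec_presses_pad code pad permutate (presses_pad code pad permutate)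

-- ===== LEMMAS AND PROOFS =====

-- B's move-run helper written as A's three-way branch
lemma run_eq (d : Int) (pos neg : String) :
    pv_run d pos neg = if 0 < d then PySem.List.pyRepeat [pos] d
      else if d < 0 then PySem.List.pyRepeat [neg] (-d) else [] := by
  unfold pv_run
  split_ifs with h1 h2
  · rfl
  · rfl
  · have hd : d = 0 := by omega
    subst hd; simp [PySem.List.pyRepeat_singleton]

-- On positions with ≥ 2 coordinates the two transition helpers agree.
lemma pad_helpers_eq (a b zero : List Int) (permutate : Bool)
    (ha : 2 ≤ a.length) (hb : 2 ≤ b.length) (hz : 2 ≤ zero.length) :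
    pad_presses_ab a b zero permutate = pad_options a b zero permutate := by
  obtain ⟨a0, a1, ta, rfl⟩ : ∃ a0 a1 ta, a = a0 :: a1 :: ta := by
    rcases a with _ | ⟨a0, _ | ⟨a1, ta⟩⟩ <;> simp_all
  obtain ⟨b0, b1, tb, rfl⟩ : ∃ b0 b1 tb, b = b0 :: b1 :: tb := by
    rcases b with _ | ⟨b0, _ | ⟨b1, tb⟩⟩ <;> simp_all
  obtain ⟨z0, z1, tz, rfl⟩ : ∃ z0 z1 tz, zero = z0 :: z1 :: tz := by
    rcases zero with _ | ⟨z0, _ | ⟨z1, tz⟩⟩ <;> simp_all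
  unfold pad_presses_ab pad_options
  simp only [run_eq, PySem.List.pyGet?_zero_cons]
  have h1 : ∀ (x : Int) (xs : List Int), PySem.List.pyGet? (x :: xs) 1 = xs[0]? := by
    intro x xs
    simpa using PySem.List.pyGet?_natCast (x :: xs) 1
  simp only [h1, List.getElem?_cons_zero]
  split_ifs <;> rfl

-- A's fused loop equals flatMap-of-product, generalized over the accumulator and start key.
lemma fold_eq_prod (pad : List (String × List Int)) (zero : List Int) (permutate : Bool)
    (hz : 2 ≤ zero.length) :
    ∀ (cs : List Char) (S : List (List String)) (p0 : List Int), 2 ≤ p0.length →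
      (∀ c ∈ cs, padOk pad (String.singleton c)) →
      (cs.foldl (fun st c =>
          match List.lookup (String.singleton c) pad with
          | some p1 =>
            (st.1.foldl (fun s1 s =>
                (pad_presses_ab st.2 p1 zero permutate).foldl (fun s1' p => s1' ++ [s ++ p]) s1) [],
             p1)
          | none => st) (S, p0)).1
        = S.flatMap (fun s =>
            (prod_concat ((List.zip
                (p0 :: cs.map (fun c => (List.lookup (String.singleton c) pad).getD []))
                (cs.map (fun c => (List.lookup (String.singleton c) pad).getD [])))
              |>.map (fun ab => pad_options ab.1 ab.2 zero permutate))).map (fun r => s ++ r)) := by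
  intro cs
  induction cs with
  | nil => intro S p0 _ _; simp [prod_concat]
  | cons c cs ih =>
    intro S p0 hp0 hok
    have hc : padOk pad (String.singleton c) := hok c (by simp)
    obtain ⟨v, hv⟩ : ∃ v, List.lookup (String.singleton c) pad = some v := by
      cases h : List.lookup (String.singleton c) pad with
      | none => exfalso; unfold padOk at hc; rw [h] at hc; simp at hc
      | some v => exact ⟨v, rfl⟩
    have hvlen : 2 ≤ v.length := by unfold padOk at hc; rw [hv] at hc; simpa using hc
    simp only [List.foldl_cons, List.map_cons, hv, Option.getD_some, List.zip_cons_cons]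
    -- rewrite A's inner double fold into flatMap form
    have hinner : (S.foldl (fun s1 s =>
        (pad_presses_ab p0 v zero permutate).foldl (fun s1' p => s1' ++ [s ++ p]) s1) [])
        = S.flatMap (fun s => (pad_presses_ab p0 v zero permutate).map (fun p => s ++ p)) := by
      have := PySem.List.foldl_congr_mem'
        (l := S) (init := ([] : List (List String)))
        (f := fun s1 s => (pad_presses_ab p0 v zero permutate).foldl (fun s1' p => s1' ++ [s ++ p]) s1)
        (g := fun s1 s => s1 ++ (pad_presses_ab p0 v zero permutate).map (fun p => s ++ p))
        (by intro x _ acc; exact PySem.List.foldl_append_singleton_eq_map ..)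
      rw [this, PySem.List.foldl_append_eq_flatMap]
      simp
    rw [hinner, ih _ v hvlen (by intro x hx; exact hok x (by simp [hx]))]
    rw [pad_helpers_eq p0 v zero permutate hp0 hvlen hz]
    simp only [prod_concat]
    simp [List.flatMap_assoc, List.map_flatMap, List.flatMap_map, List.map_map, Function.comp_def, List.append_assoc]

-- ===== VERDICT (by name: the statement is the Claim_ definition above) =====
theorem presses_pad_spec : Claim_equal_presses_pad := by
  intro code pad permutate _ hpre
  obtain ⟨hA, h_, hne⟩ := hpre
  unfold Spec_presses_pad
  obtain ⟨pA, hpA⟩ := Option.isSome_iff_exists.mp hA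
  obtain ⟨zero, hzero⟩ := Option.isSome_iff_exists.mp h_
  unfold presses_pad presses_pad_alt
  rw [hpA, hzero]; dsimp only
  by_cases hcode : code.toList = []
  · simp [hcode, prod_concat]
  · obtain ⟨hOkA, hOk_, hOkc⟩ := hne hcode
    have hOkc' : ∀ c ∈ code.toList, padOk pad (String.singleton c) := by
      intro c hcmem
      unfold padOk
      exact of_decide_eq_true (List.all_eq_true.mp hOkc c hcmem)
    have hpAlen : 2 ≤ pA.length := by unfold padOk at hOkA; rw [hpA] at hOkA; simpa using hOkA
    have hzlen : 2 ≤ zero.length := by unfold padOk at hOk_; rw [hzero] at hOk_; simpa using hOk_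
    rw [fold_eq_prod pad zero permutate hzlen code.toList _ pA hpAlen hOkc']
    simp
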